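-- pv_equiv track=rewrite | github.com/fkie-cad/FACT_core | src/web_interface/components/hex_highlighting.py | _get_hex_and_str_preview
-- ===== SOURCE A (Python) =====
-- import string
--
-- HIGHLIGHTING_CLASSES = [
--     (set(string.ascii_letters.encode()), 'number'),
--     (set(string.digits.encode()), 'built_in'),
--     (set(range(128, 255)), 'keyword'),
--     ({0, 255}, 'comment'),  # \x00 and \xff
-- ]
--
-- PRINTABLE = set(string.printable.encode()) - set(b'\n\t\r\x0b\x0c')
--
-- CLOSING_SPAN = '</span>'
--
-- def _get_hex_and_str_preview(line: list[int]) -> tuple[str, str]: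
--     hex_content, str_preview = '', ''
--     last_highlighting_class = None
--     for char in line:
--         highlighting_class = _get_highlighting_class(char)
--         if _span_should_close(last_highlighting_class, highlighting_class):
--             hex_content += CLOSING_SPAN
--             str_preview += CLOSING_SPAN
--         if _span_should_open(last_highlighting_class, highlighting_class):
--             span = f'{_get_html_span(highlighting_class)}'
--             hex_content += span
--             str_preview += span
--         hex_content += f' {_chr_to_hex(char)}'
--         str_preview += f'{chr(char)}' if char in PRINTABLE else '.'
--         last_highlighting_class = highlighting_class
--     if last_highlighting_class is not None:  # close last span
--         hex_content += CLOSING_SPAN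
--         str_preview += CLOSING_SPAN
--     return hex_content, str_preview
--
-- def _span_should_close(last_class: str | None, current_class: str | None) -> bool:
--     return last_class is not None and current_class != last_class
--
-- def _span_should_open(last_class: str | None, current_class: str | None) -> bool:
--     return current_class is not None and current_class != last_class
--
-- def _get_highlighting_class(char: int) -> str | None:
--     for char_range, highlighting_class in HIGHLIGHTING_CLASSES:
--         if char in char_range:
--             return highlighting_class
--     return None
--
-- def _get_html_span(highlighting_class: str) -> str:
--     return f'<span class="hljs-{highlighting_class}">'  # reuse highlight.js classes for highlighting
--
-- def _chr_to_hex(char: int) -> str: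
--     return f'{char:#04x}'[2:].upper()
-- ===== SOURCE B (Python) =====
-- import string
-- from itertools import groupby
--
-- HIGHLIGHTING_CLASSES = [
--     (set(string.ascii_letters.encode()), 'number'),
--     (set(string.digits.encode()), 'built_in'),
--     (set(range(128, 255)), 'keyword'),
--     ({0, 255}, 'comment'),
-- ]
--
-- PRINTABLE = set(string.printable.encode()) - set(b'\n\t\r\x0b\x0c')
--
-- CLOSING_SPAN = '</span>'
--
--
-- def _get_highlighting_class(char: int):
--     for char_range, highlighting_class in HIGHLIGHTING_CLASSES:
--         if char in char_range:
--             return highlighting_class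
--     return None
--
--
-- def _chr_to_hex(char: int) -> str:
--     return f'{char:#04x}'[2:].upper()
--
--
-- def _get_hex_and_str_preview(line: list[int]) -> tuple[str, str]:
--     hex_parts, str_parts = [], []
--     for cls, group in groupby(line, key=_get_highlighting_class):
--         chars = list(group)
--         hex_frag = ''.join(f' {_chr_to_hex(c)}' for c in chars)
--         str_frag = ''.join(chr(c) if c in PRINTABLE else '.' for c in chars)
--         if cls is not None:
--             span = f'<span class="hljs-{cls}">'
--             hex_frag = span + hex_frag + CLOSING_SPAN
--             str_frag = span + str_frag + CLOSING_SPAN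
--         hex_parts.append(hex_frag)
--         str_parts.append(str_frag)
--     return ''.join(hex_parts), ''.join(str_parts)
-- ===== Notes on version B (the rewrite author's own statement) =====
-- stated objective: simpler
-- what changed: Replaced A's stateful loop (last_highlighting_class with open/close-span branching and a trailing close special case) by an itertools.groupby decomposition into runs of equal class, each run rendered independently and wrapped in a span if its class is not None.
import Mathlib
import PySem

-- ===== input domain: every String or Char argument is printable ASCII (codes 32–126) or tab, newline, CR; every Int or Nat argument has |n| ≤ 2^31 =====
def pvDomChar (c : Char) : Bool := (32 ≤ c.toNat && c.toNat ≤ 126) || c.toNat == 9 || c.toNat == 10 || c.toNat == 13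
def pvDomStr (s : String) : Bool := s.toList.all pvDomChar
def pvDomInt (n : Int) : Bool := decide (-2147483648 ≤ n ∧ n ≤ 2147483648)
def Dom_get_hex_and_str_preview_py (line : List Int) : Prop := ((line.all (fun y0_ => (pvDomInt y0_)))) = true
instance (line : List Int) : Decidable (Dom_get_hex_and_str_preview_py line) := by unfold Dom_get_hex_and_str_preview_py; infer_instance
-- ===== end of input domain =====

-- B replaces A's running last-class state and its open/close/trailing-close special cases by an
-- itertools.groupby decomposition into runs of equal highlighting class, wrapping each non-None run
-- in a span (objective: simpler decomposition, same cost).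

-- ===== PORT A =====
-- shared per-char helpers (used verbatim by both Pythons)

def pvClosingSpan : String := "</span>"

-- _get_highlighting_class: first matching range wins (ranges are the byte sets from HIGHLIGHTING_CLASSES)
def hlClass (c : Int) : Option String :=
  if (65 ≤ c ∧ c ≤ 90) ∨ (97 ≤ c ∧ c ≤ 122) then some "number"
  else if 48 ≤ c ∧ c ≤ 57 then some "built_in"
  else if 128 ≤ c ∧ c ≤ 254 then some "keyword"
  else if c = 0 ∨ c = 255 then some "comment"
  else none

-- _chr_to_hex: hand port of f'{char:#04x}'[2:].upper(), exact for every Int: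
-- nonnegative → lowercase hex zero-padded to 2 then uppercased; negative → the '0' of '-0x…' is
-- eaten by the sign, so [2:] leaves 'x' + digits, uppercased to 'X' + digits.
def chrToHex (c : Int) : String :=
  if c < 0 then "X" ++ String.ofList ((Nat.toDigits 16 (-c).toNat).map Char.toUpper)
  else if c < 16 then "0" ++ String.ofList ((Nat.toDigits 16 c.toNat).map Char.toUpper)
  else String.ofList ((Nat.toDigits 16 c.toNat).map Char.toUpper)

-- chr(char) if char in PRINTABLE else '.'  (PRINTABLE is exactly the codes 32..126)
def prevOf (c : Int) : String :=
  if 32 ≤ c ∧ c ≤ 126 then String.ofList [Char.ofNat c.toNat] else "."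

-- _get_html_span (applied to the Option the loop holds; only called when it is some _)
def openSpan (hc : Option String) : String :=
  match hc with
  | some k => "<span class=\"hljs-" ++ k ++ "\">"
  | none => ""

def spanShouldClose (last cur : Option String) : Bool := last ≠ none ∧ cur ≠ last
def spanShouldOpen (last cur : Option String) : Bool := cur ≠ none ∧ cur ≠ last

-- the for-loop of A, state (hex_content, str_preview, last_highlighting_class)
def aLoop (line : List Int) (hex strp : String) (last : Option String) : String × String :=
  match line with
  | [] =>
    match last with
    | some _ => (hex ++ pvClosingSpan, strp ++ pvClosingSpan)
    | none => (hex, strp)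
  | c :: rest =>
    let hc := hlClass c
    let hex1 := if spanShouldClose last hc then hex ++ pvClosingSpan else hex
    let str1 := if spanShouldClose last hc then strp ++ pvClosingSpan else strp
    let hex2 := if spanShouldOpen last hc then hex1 ++ openSpan hc else hex1
    let str2 := if spanShouldOpen last hc then str1 ++ openSpan hc else str1
    aLoop rest (hex2 ++ " " ++ chrToHex c) (str2 ++ prevOf c) hc

def get_hex_and_str_preview_py (line : List Int) : String × String :=
  aLoop line "" "" none

-- ===== PORT B =====
-- itertools.groupby(line, key=_get_highlighting_class): consecutive runs of equal class
def runsB (line : List Int) : List (Option String × List Int) :=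
  match line with
  | [] => []
  | c :: rest =>
    (hlClass c, c :: rest.takeWhile (fun x => hlClass x == hlClass c))
      :: runsB (rest.dropWhile (fun x => hlClass x == hlClass c))
termination_by line.length
decreasing_by
  simp only [List.length_cons]
  exact Nat.lt_succ_of_le (List.length_dropWhile_le _ _)

-- ''.join(f' {_chr_to_hex(c)}' for c in chars)
def rawH : List Int → String
  | [] => ""
  | c :: t => " " ++ chrToHex c ++ rawH t

-- ''.join(chr(c) if c in PRINTABLE else '.' for c in chars)
def rawS : List Int → String
  | [] => ""
  | c :: t => prevOf c ++ rawS t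

-- one group's (hex_frag, str_frag)
def fragOf (g : Option String × List Int) : String × String :=
  match g.1 with
  | some k => (openSpan (some k) ++ rawH g.2 ++ pvClosingSpan,
               openSpan (some k) ++ rawS g.2 ++ pvClosingSpan)
  | none => (rawH g.2, rawS g.2)

-- ''.join(hex_parts), ''.join(str_parts)
def catFrags : List (String × String) → String × String
  | [] => ("", "")
  | f :: fs => let r := catFrags fs; (f.1 ++ r.1, f.2 ++ r.2)

def get_hex_and_str_preview_py_alt (line : List Int) : String × String :=
  catFrags ((runsB line).map fragOf)

-- ===== PRECONDITION & SPEC =====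
def Spec_get_hex_and_str_preview_py (line : List Int) (out : String × String) : Prop := out = get_hex_and_str_preview_py_alt line
instance (line : List Int) (out : String × String) : Decidable (Spec_get_hex_and_str_preview_py line out) := by unfold Spec_get_hex_and_str_preview_py; infer_instance

-- ===== CLAIM (what is proved, stated in full; the proofs are below) =====
def Claim_equal_get_hex_and_str_preview_py : Prop := ∀ (line : List Int), Dom_get_hex_and_str_preview_py line → Spec_get_hex_and_str_preview_py line (get_hex_and_str_preview_py line)

-- ===== LEMMAS AND PROOFS =====

@[simp] theorem spanShouldClose_none_left (cur : Option String) : spanShouldClose none cur = false := by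
  simp [spanShouldClose]

@[simp] theorem spanShouldOpen_none_right (last : Option String) : spanShouldOpen last none = false := by
  simp [spanShouldOpen]

@[simp] theorem spanShouldClose_self (l : Option String) : spanShouldClose l l = false := by
  simp [spanShouldClose]

@[simp] theorem spanShouldOpen_self (l : Option String) : spanShouldOpen l l = false := by
  simp [spanShouldOpen]

theorem dropWhile_head_false {α : Type} (p : α → Bool) :
    ∀ (l : List α) (x : α) (xs : List α), l.dropWhile p = x :: xs → p x = false := by
  intro l
  induction l with
  | nil => intro x xs h; simp [List.dropWhile] at h
  | cons a t ih =>
    intro x xs h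
    by_cases hp : p a
    · rw [List.dropWhile_cons_of_pos hp] at h; exact ih x xs h
    · rw [List.dropWhile_cons_of_neg hp] at h
      cases h; simpa using hp

-- a run whose chars all have class none passes through with last = none, raw content only
theorem run_none (t : List Int) :
    ∀ (d : List Int) (hex strp : String), (∀ x ∈ t, hlClass x = none) →
      aLoop (t ++ d) hex strp none = aLoop d (hex ++ rawH t) (strp ++ rawS t) none := by
  induction t with
  | nil => intro d hex strp _; simp [rawH, rawS]
  | cons c t ih =>
    intro d hex strp hall
    have hc : hlClass c = none := hall c (by simp)
    have hrest : ∀ x ∈ t, hlClass x = none := fun x hx => hall x (by simp [hx])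
    simp only [List.cons_append, aLoop, hc, spanShouldClose_none_left, spanShouldOpen_none_right,
      Bool.false_eq_true, if_false]
    rw [ih d _ _ hrest]
    simp [rawH, rawS, String.append_assoc]

-- a run whose chars all have class some k passes through with last = some k, raw content only
theorem run_some (k : String) (t : List Int) :
    ∀ (d : List Int) (hex strp : String), (∀ x ∈ t, hlClass x = some k) →
      aLoop (t ++ d) hex strp (some k) = aLoop d (hex ++ rawH t) (strp ++ rawS t) (some k) := by
  induction t with
  | nil => intro d hex strp _; simp [rawH, rawS]
  | cons c t ih =>
    intro d hex strp hall
    have hc : hlClass c = some k := hall c (by simp)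
    have hrest : ∀ x ∈ t, hlClass x = some k := fun x hx => hall x (by simp [hx])
    simp only [List.cons_append, aLoop, hc, spanShouldClose_self, spanShouldOpen_self,
      Bool.false_eq_true, if_false]
    rw [ih d _ _ hrest]
    simp [rawH, rawS, String.append_assoc]

-- when the class changes away from some k, A closes the span and continues as if fresh
theorem switch_lemma (k : String) (c : Int) (d : List Int) (hex strp : String)
    (h : hlClass c ≠ some k) :
    aLoop (c :: d) hex strp (some k) = aLoop (c :: d) (hex ++ pvClosingSpan) (strp ++ pvClosingSpan) none := by
  have hclose : spanShouldClose (some k) (hlClass c) = true := by simp [spanShouldClose, h]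
  have hopen : spanShouldOpen (some k) (hlClass c) = spanShouldOpen none (hlClass c) := by
    by_cases hn : hlClass c = none <;> simp [spanShouldOpen, hn, h]
  simp only [aLoop, hclose, hopen, spanShouldClose_none_left, Bool.false_eq_true, if_false, if_true]

-- main invariant: from a fresh state, A's loop appends exactly B's output
theorem main_inv : ∀ (n : Nat) (line : List Int), line.length ≤ n → ∀ (hex strp : String),
    aLoop line hex strp none =
      (hex ++ (get_hex_and_str_preview_py_alt line).1, strp ++ (get_hex_and_str_preview_py_alt line).2) := by
  intro n
  induction n with
  | zero =>
    intro line hlen hex strp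
    have : line = [] := List.eq_nil_of_length_eq_zero (Nat.le_zero.mp hlen)
    subst this
    simp [aLoop, get_hex_and_str_preview_py_alt, runsB, catFrags]
  | succ m ih =>
    intro line hlen hex strp
    match line with
    | [] => simp [aLoop, get_hex_and_str_preview_py_alt, runsB, catFrags]
    | c :: rest =>
      have hsplit : rest.takeWhile (fun x => hlClass x == hlClass c) ++
          rest.dropWhile (fun x => hlClass x == hlClass c) = rest := List.takeWhile_append_dropWhile
      set t := rest.takeWhile (fun x => hlClass x == hlClass c) with ht
      set d := rest.dropWhile (fun x => hlClass x == hlClass c) with hd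
      have htall : ∀ x ∈ t, hlClass x = hlClass c := by
        intro x hx
        have := List.mem_takeWhile_imp hx
        simpa using this
      have hdlen : d.length ≤ m := by
        have h1 : d.length ≤ rest.length := List.length_dropWhile_le _ _
        have h2 : rest.length ≤ m := by simpa using Nat.le_of_succ_le_succ hlen
        omega
      have halt : get_hex_and_str_preview_py_alt (c :: rest) =
          ((fragOf (hlClass c, c :: t)).1 ++ (get_hex_and_str_preview_py_alt d).1,
           (fragOf (hlClass c, c :: t)).2 ++ (get_hex_and_str_preview_py_alt d).2) := by
        rw [get_hex_and_str_preview_py_alt, runsB]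
        simp only [← ht, ← hd, List.map_cons, catFrags]
        rfl
      rw [halt]
      by_cases hk : ∃ k, hlClass c = some k
      · obtain ⟨k, hck⟩ := hk
        -- first step opens the span
        have step1 : aLoop (c :: rest) hex strp none =
            aLoop rest (hex ++ openSpan (some k) ++ " " ++ chrToHex c)
                       (strp ++ openSpan (some k) ++ prevOf c) (some k) := by
          simp only [aLoop, hck, spanShouldClose, spanShouldOpen]
          simp
        rw [step1, ← hsplit, run_some k t d _ _ (fun x hx => (htall x hx).trans hck)]
        match hdm : d with
        | [] =>
          simp [aLoop, fragOf, hck, rawH, rawS, get_hex_and_str_preview_py_alt, runsB, catFrags,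
            String.append_assoc]
        | x :: d' =>
          have hx : hlClass x ≠ some k := by
            have := dropWhile_head_false (fun x => hlClass x == hlClass c) rest x d' hd.symm
            simp only [beq_eq_false_iff_ne, ne_eq] at this
            rw [hck] at this; exact this
          rw [switch_lemma k x d' _ _ hx]
          rw [ih (x :: d') (by simpa [hdm] using hdlen) _ _]
          simp [fragOf, hck, rawH, rawS, String.append_assoc]
      · have hcn : hlClass c = none := by
          cases h : hlClass c with
          | none => rfl
          | some k => exact absurd ⟨k, h⟩ hk
        have hcall : ∀ x ∈ c :: t, hlClass x = none := by
          intro x hx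
          rcases List.mem_cons.mp hx with h | h
          · subst h; exact hcn
          · exact (htall x h).trans hcn
        have : aLoop (c :: rest) hex strp none =
            aLoop ((c :: t) ++ d) hex strp none := by rw [List.cons_append, hsplit]
        rw [this, run_none (c :: t) d _ _ hcall, ih d hdlen _ _]
        simp [fragOf, hcn, String.append_assoc]

-- ===== VERDICT (by name: the statement is the Claim_ definition above) =====
theorem get_hex_and_str_preview_py_spec : Claim_equal_get_hex_and_str_preview_py := by
  intro line _
  unfold Spec_get_hex_and_str_preview_py get_hex_and_str_preview_py
  rw [main_inv line.length line (le_refl _)]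
  simp
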